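-- pv_equiv track=rewrite | github.com/vlbin/aoc19 | src/day4/ch1.py | decrease
-- ===== SOURCE A (Python) =====
-- def decrease(number):
-- 	numarr = list(map(int, str(number)))
-- 	prev = int(str(number)[0])
-- 	for c in numarr:
-- 		if c < prev:
-- 			return True
-- 		prev = c
-- 	return False
-- ===== SOURCE B (Python) =====
-- def decrease(number):
--     digits = list(map(int, str(number)))
--     return digits != sorted(digits)
-- ===== Notes on version B (the rewrite author's own statement) =====
-- stated objective: simpler
-- what changed: Replaces the single-pass adjacent-comparison loop with a sort-and-compare monotonicity test: the digit list has a decreasing adjacent pair iff it differs from its sorted copy.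
import Mathlib
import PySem

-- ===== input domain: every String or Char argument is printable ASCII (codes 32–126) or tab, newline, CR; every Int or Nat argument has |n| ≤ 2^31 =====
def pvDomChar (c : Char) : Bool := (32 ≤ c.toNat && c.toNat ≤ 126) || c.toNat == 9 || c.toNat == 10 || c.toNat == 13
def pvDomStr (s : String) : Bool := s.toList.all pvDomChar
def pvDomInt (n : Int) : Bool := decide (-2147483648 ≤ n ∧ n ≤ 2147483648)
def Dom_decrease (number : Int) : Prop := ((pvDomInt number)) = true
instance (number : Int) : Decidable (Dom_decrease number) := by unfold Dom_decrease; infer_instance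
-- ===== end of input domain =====

-- B replaces A's adjacent-decrease scan by a sort-and-compare monotonicity test (objective: simpler).

-- ===== PORT A =====
-- the for-loop of A: returns True at the first c < prev, else carries prev := c
def decLoop (prev : Int) : List Int → Bool
  | [] => false
  | c :: t => if c < prev then true else decLoop c t

-- int(c) for a one-character string, ported as PySem.Int.ofChars? [c]; the getD defaults are
-- unreachable inside Pre_decrease (a non-negative int prints as a nonempty all-digit string,
-- so str(number)[0] exists and every int(c) succeeds).
def decrease (number : Int) : Bool :=
  let numarr := (PySem.Int.toChars number).map (fun c => (PySem.Int.ofChars? [c]).getD 0)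
  let prev := (PySem.Int.ofChars? [((PySem.Str.pyGet? (PySem.Int.toStr number) 0).getD '0')]).getD 0
  decLoop prev numarr

-- ===== PORT B =====
def decrease_alt (number : Int) : Bool :=
  let digits := (PySem.Int.toChars number).map (fun c => (PySem.Int.ofChars? [c]).getD 0)
  decide (digits ≠ PySem.List.sorted digits (fun x => x) false)

-- ===== PRECONDITION & SPEC =====
-- Pre_ excludes negative numbers: there str(number) starts with '-' and int('-') raises ValueError
-- in both A and B.
def Pre_decrease (number : Int) : Prop := 0 ≤ number
instance (number : Int) : Decidable (Pre_decrease number) := by unfold Pre_decrease; infer_instance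
def pvWitness_decrease : Int := 1320
def Spec_decrease (number : Int) (out : Bool) : Prop := out = decrease_alt number
instance (number : Int) (out : Bool) : Decidable (Spec_decrease number out) := by unfold Spec_decrease; infer_instance

-- ===== CLAIM (what is proved, stated in full; the proofs are below) =====
def Claim_equal_decrease : Prop := ∀ (number : Int), Dom_decrease number → Pre_decrease number → Spec_decrease number (decrease number)

-- ===== LEMMAS AND PROOFS =====

-- A's loop returns true exactly when prev :: l is not a ≤-chain (has an adjacent decrease)
theorem decLoop_true_iff (l : List Int) : ∀ p : Int,
    decLoop p l = true ↔ ¬ List.IsChain (· ≤ ·) (p :: l) := by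
  induction l with
  | nil => intro p; simp [decLoop]
  | cons c t ih =>
    intro p
    by_cases h : c < p
    · simp only [decLoop, if_pos h, List.isChain_cons_cons]
      constructor
      · intro _ hc; omega
      · intro _; trivial
    · simp only [decLoop, if_neg h, List.isChain_cons_cons, ih c]
      constructor
      · intro hl hc; exact hl hc.2
      · intro hl hc; exact hl ⟨by omega, hc⟩

-- B's test: a list equals its Python-sorted copy iff it is a ≤-chain
theorem eq_sorted_iff_chain (l : List Int) :
    l = PySem.List.sorted l (fun x => x) false ↔ List.IsChain (· ≤ ·) l := by
  have hT : ∀ m : List Int, List.IsChain (· ≤ ·) m ↔ m.Pairwise (· ≤ ·) :=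
    fun m => List.isChain_iff_pairwise
  constructor
  · intro h
    rw [h, hT]
    simpa using PySem.List.sorted_pairwise l (fun x => x)
  · intro h
    exact (PySem.List.sorted_eq_self_of_pairwise l (fun x => x)
      (by simpa using (hT l).mp h)).symm

-- the core identity both ports reduce to (A's scan started at the head vs B's sort-compare)
theorem decLoop_eq_decide (a : Int) (m : List Int) :
    decLoop a (a :: m) = decide (a :: m ≠ PySem.List.sorted (a :: m) (fun x => x) false) := by
  have hstep : decLoop a (a :: m) = decLoop a m := by simp [decLoop]
  rw [hstep]
  by_cases hc : List.IsChain (· ≤ ·) (a :: m)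
  · have h1 : decLoop a m = false := by
      rw [← Bool.not_eq_true, decLoop_true_iff]; simp [hc]
    have h2 := (eq_sorted_iff_chain (a :: m)).mpr hc
    simp [h1, ← h2]
  · have h1 : decLoop a m = true := (decLoop_true_iff m a).mpr hc
    have h2 : a :: m ≠ PySem.List.sorted (a :: m) (fun x => x) false :=
      fun he => hc ((eq_sorted_iff_chain _).mp he)
    simp [h1, h2]

-- ===== VERDICT (by name: the statement is the Claim_ definition above) =====
theorem decrease_spec : Claim_equal_decrease := by
  intro n _ _
  unfold Spec_decrease decrease decrease_alt
  cases h : PySem.Int.toChars n with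
  | nil =>
    have hs : PySem.List.sorted ([] : List Int) (fun x => x) false = [] :=
      PySem.List.sorted_eq_self_of_pairwise _ _ (List.Pairwise.nil)
    simp [h, decLoop, hs]
  | cons c t =>
    have hget : PySem.Str.pyGet? (PySem.Int.toStr n) 0 = some c := by
      simp [PySem.Str.pyGet?, PySem.List.pyGet?, PySem.List.pyIdx?,
        PySem.Int.toList_toStr, h]
    simp only [h, hget, List.map, Option.getD_some]
    exact decLoop_eq_decide _ _
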